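-- pv_equiv track=rewrite | github.com/YagoRizzetti/AlgoritmosYEstructurasDeDatos1 | PrimerCuatrimestre/SegundoParcial/82121_RizzettiYago/funciones.py | controln
-- ===== SOURCE A (Python) =====
-- def esVocal(x):
--     vocales = "aeiou"
--     ev = False
--     if x in vocales:
--         ev = True
--     return ev
--
-- def controln(x):
--     countpvyn = 0
--     plv = False
--     tienen = False
--     countl = 0
--     for i in x:
--         if i == " " or i == ".":
--             if plv and tienen:
--                 countpvyn += 1
--             tienen = False
--             plv = False
--             countl = 0
--         else:
--             countl += 1
--             if countl == 1:
--                 ev = esVocal(i)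
--                 if ev:
--                     plv = True
--             else:
--                 if i == "n":
--                     tienen = True
--     return countpvyn
-- ===== SOURCE B (Python) =====
-- def controln(x):
--     count = 0
--     rest = x
--     while True:
--         k = -1
--         for idx, c in enumerate(rest):
--             if c == " " or c == ".":
--                 k = idx
--                 break
--         if k == -1:
--             return count
--         w = rest[:k]
--         if w != "" and w[0] in "aeiou" and "n" in w[1:]:
--             count += 1
--         rest = rest[k + 1:]
-- ===== Notes on version B (the rewrite author's own statement) =====
-- stated objective: alternative
-- what changed: A scans characters once updating boolean flags (first-letter-vowel, contains-n, letter count); B instead tokenizes: it repeatedly finds the next space-or-dot separator, slices the terminated word out, and classifies the whole word with string membership tests.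
import Mathlib
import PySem

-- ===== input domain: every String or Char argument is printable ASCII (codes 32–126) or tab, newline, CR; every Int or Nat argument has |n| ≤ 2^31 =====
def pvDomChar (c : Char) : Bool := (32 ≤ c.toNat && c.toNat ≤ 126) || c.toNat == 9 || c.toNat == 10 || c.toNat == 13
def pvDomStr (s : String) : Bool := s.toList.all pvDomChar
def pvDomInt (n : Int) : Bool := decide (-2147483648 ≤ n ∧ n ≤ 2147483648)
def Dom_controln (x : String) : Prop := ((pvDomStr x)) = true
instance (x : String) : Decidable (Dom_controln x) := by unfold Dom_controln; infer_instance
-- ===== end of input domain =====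

-- B replaces A's per-character boolean state machine by a tokenize-then-classify loop
-- (find the next ' '/'.'-separator, cut the word out, test it as a whole); alternative
-- decomposition, same return value on every input.

-- ===== PORT A =====
def esVocal (x : Char) : Bool :=
  let vocales : List Char := "aeiou".toList
  let ev := false
  if PySem.Chars.isIn [x] vocales then true else ev

def controlnStep (st : Int × Bool × Bool × Int) (i : Char) : Int × Bool × Bool × Int :=
  match st with
  | (countpvyn, plv, tienen, countl) =>
    if i == ' ' || i == '.' then
      ((if plv && tienen then countpvyn + 1 else countpvyn), false, false, 0)
    else
      let countl := countl + 1
      if countl == 1 then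
        (countpvyn, (if esVocal i then true else plv), tienen, countl)
      else
        (countpvyn, plv, (if i == 'n' then true else tienen), countl)

def controln (x : String) : Int :=
  (x.toList.foldl controlnStep (0, false, false, 0)).1

-- ===== PORT B =====
-- 'for idx, c in enumerate(rest): if c == " " or c == ".": k = idx; break' (no hit = k == -1)
def findSep : List Char → Option Nat
  | [] => none
  | c :: rest => if c == ' ' || c == '.' then some 0 else (findSep rest).map (· + 1)

-- termination fact for goB, cited by its decreasing_by
theorem findSep_lt_length (l : List Char) (k : Nat) (h : findSep l = some k) : k < l.length := by
  induction l generalizing k with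
  | nil => simp [findSep] at h
  | cons c rest ih =>
    rw [findSep] at h
    by_cases hc : (c == ' ' || c == '.') = true
    · rw [if_pos hc] at h
      cases h
      simp
    · rw [if_neg hc] at h
      obtain ⟨m, hm, rfl⟩ := Option.map_eq_some_iff.mp h
      have := ih m hm
      simp
      omega

-- 'w != "" and w[0] in "aeiou" and "n" in w[1:]'
def wordOK (w : List Char) : Bool :=
  match w with
  | [] => false
  | c :: rest => PySem.Chars.isIn [c] ("aeiou".toList) && PySem.Chars.isIn ['n'] rest

-- the 'while True' loop over (count, rest); rest[:k] / rest[k+1:] are take/drop (0 ≤ k)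
def goB (count : Int) (rest : List Char) : Int :=
  match h : findSep rest with
  | none => count
  | some k =>
    goB (if wordOK (rest.take k) then count + 1 else count) (rest.drop (k + 1))
termination_by rest.length
decreasing_by
  have := findSep_lt_length rest k h
  simp [List.length_drop]
  omega

def controln_alt (x : String) : Int := goB 0 x.toList

-- ===== PRECONDITION & SPEC =====
def Spec_controln (x : String) (out : Int) : Prop := out = controln_alt x
instance (x : String) (out : Int) : Decidable (Spec_controln x out) := by unfold Spec_controln; infer_instance

-- ===== CLAIM (what is proved, stated in full; the proofs are below) =====
def Claim_equal_controln : Prop := ∀ (x : String), Dom_controln x → Spec_controln x (controln x)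

-- ===== LEMMAS AND PROOFS =====
theorem isIn_singleton (a : Char) (s : List Char) :
    PySem.Chars.isIn [a] s = decide (a ∈ s) := by
  rw [Bool.eq_iff_iff, PySem.Chars.isIn_iff_infix]
  simp [List.singleton_infix_iff]

theorem goB_of_none (n : Int) (rest : List Char) (h : findSep rest = none) :
    goB n rest = n := by
  rw [goB]
  split
  · rfl
  · next k heq => rw [h] at heq; cases heq

theorem goB_of_some (n : Int) (rest : List Char) (k : Nat) (h : findSep rest = some k) :
    goB n rest = goB (if wordOK (rest.take k) then n + 1 else n) (rest.drop (k + 1)) := by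
  conv_lhs => rw [goB]
  split
  · next heq => rw [h] at heq; cases heq
  · next k' heq =>
    rw [h] at heq
    cases heq
    rfl

theorem findSep_none (w : List Char) (hw : ∀ c ∈ w, ¬(c = ' ' ∨ c = '.')) :
    findSep w = none := by
  induction w with
  | nil => rfl
  | cons c rest ih =>
    have hc := hw c (by simp)
    rw [findSep, if_neg (by simpa using hc), ih (fun d hd => hw d (by simp [hd]))]
    rfl

theorem findSep_append (w : List Char) (c : Char) (l : List Char)
    (hw : ∀ d ∈ w, ¬(d = ' ' ∨ d = '.')) (hc : c = ' ' ∨ c = '.') :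
    findSep (w ++ c :: l) = some w.length := by
  induction w with
  | nil => simp [findSep, show (c == ' ' || c == '.') = true by simpa using hc]
  | cons d rest ih =>
    have hd := hw d (by simp)
    rw [List.cons_append, findSep, if_neg (by simpa using hd),
      ih (fun e he => hw e (by simp [he]))]
    rfl

-- A's flags as functions of the word prefix read so far
def plvF (w : List Char) : Bool :=
  match w with
  | [] => false
  | a :: _ => esVocal a

def tienF (w : List Char) : Bool :=
  match w with
  | [] => false
  | _ :: t => PySem.Chars.isIn ['n'] t

theorem wordOK_eq (w : List Char) : wordOK w = (plvF w && tienF w) := by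
  cases w with
  | nil => rfl
  | cons a t => simp [wordOK, plvF, tienF, esVocal]

theorem plvF_nil : plvF [] = false := rfl
theorem tienF_nil : tienF [] = false := rfl

theorem fold_eq (l : List Char) : ∀ (w : List Char) (n : Int),
    (∀ c ∈ w, ¬(c = ' ' ∨ c = '.')) →
    (l.foldl controlnStep (n, plvF w, tienF w, (w.length : Int))).1 = goB n (w ++ l) := by
  induction l with
  | nil =>
    intro w n hw
    rw [List.foldl_nil, List.append_nil, goB_of_none n w (findSep_none w hw)]
  | cons c l' ih =>
    intro w n hw
    by_cases hc : c = ' ' ∨ c = '.'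
    · have hstep : controlnStep (n, plvF w, tienF w, (w.length : Int)) c =
          ((if wordOK w then n + 1 else n), false, false, 0) := by
        simp only [controlnStep]
        rw [if_pos (show (c == ' ' || c == '.') = true by simpa using hc), wordOK_eq]
      rw [List.foldl_cons, hstep,
        goB_of_some n (w ++ c :: l') w.length (findSep_append w c l' hw hc),
        List.take_left, show w ++ c :: l' = (w ++ [c]) ++ l' by simp,
        show w.length + 1 = (w ++ [c]).length by simp, List.drop_left]
      have h0 := ih [] (if wordOK w then n + 1 else n) (by simp)
      rw [plvF_nil, tienF_nil] at h0
      simpa using h0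
    · have hcb : ¬(c == ' ' || c == '.') = true := by simpa using hc
      cases w with
      | nil =>
        have hstep : controlnStep (n, plvF [], tienF [], ((([] : List Char).length : Nat) : Int)) c =
            (n, plvF [c], tienF [c], (([c].length : Nat) : Int)) := by
          simp [controlnStep, hcb, plvF, tienF, isIn_singleton]
        rw [List.foldl_cons, hstep]
        have := ih [c] n (by simpa using hc)
        simpa using this
      | cons a t =>
        have hne : ¬(((((a :: t).length : Nat) : Int) + 1) == 1) = true := by
          simp only [List.length_cons, beq_iff_eq]
          push_cast
          omega
        have h2 : (if c == 'n' then true else tienF (a :: t)) = tienF ((a :: t) ++ [c]) := by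
          simp only [tienF, List.cons_append]
          rw [isIn_singleton, isIn_singleton]
          by_cases h : c = 'n'
          · subst h
            simp [List.mem_append]
          · have h' : ¬('n' = c) := fun e => h e.symm
            simp [List.mem_append, h, h']
        have hstep : controlnStep (n, plvF (a :: t), tienF (a :: t), (((a :: t).length : Nat) : Int)) c =
            (n, plvF (a :: t), tienF ((a :: t) ++ [c]), (((a :: t).length : Nat) : Int) + 1) := by
          simp only [controlnStep, if_neg hcb]
          rw [if_neg hne, h2]
        have h1 : plvF (a :: t) = plvF ((a :: t) ++ [c]) := rfl
        have h3 : (((a :: t).length : Nat) : Int) + 1 = ((((a :: t) ++ [c]).length : Nat) : Int) := by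
          simp
        rw [List.foldl_cons, hstep, h1, h3,
          ih ((a :: t) ++ [c]) n (by
            intro d hd
            rcases List.mem_append.mp hd with h | h
            · exact hw d h
            · simp at h; subst h; exact hc)]
        simp

-- ===== VERDICT (by name: the statement is the Claim_ definition above) =====
theorem controln_spec : Claim_equal_controln := by
  intro x _
  unfold Spec_controln controln controln_alt
  have := fold_eq x.toList [] 0 (by simp)
  rw [plvF_nil, tienF_nil] at this
  simpa using this
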